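-- pv_equiv track=rewrite | github.com/fian-tuesday/interfan | old/simple_trace_interferogram_lines_int3b.py | trace_line
-- ===== SOURCE A (Python) =====
-- import collections
--
-- max_line_interruption_distance = 25
--
-- Point = collections.namedtuple('Point', ['x', 'y'])
--
-- def trace_line(start_point, extremal_points, lower_border_line = None, upper_border_line = None):
--     """ Осуществляет трассировку линии справа-налево, шагая по базовым точкам.
--         :param start_point: опорная точка, от которой начинается трассировка
--         :param extremal_points: список или множество координат y точек, похожих на точки линий данного типа
--         :param lower_border_line: пограничная линия с меньшими y (на рисунке сверху), за которые нельзя вылезать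
--         :param upper_border_line: пограничные линии с большими y (на рисунке снизу), за которые нельзя вылезать
--
--         :return: список координат (x, y) точек трассируемой линии
--     """
--     line = []
--     old_x, old_y = start_point
--     for x in range(old_x - 1, -1, -1):
--         for dy in ((1-2*(i%2))*(i+1)//2 for i in range(max_line_interruption_distance*2+1)):  # 0, +1, -1, +2, -2, +3, -3, +4, -4, +5, -5, +6, -6, +7, -7
--             y = old_y + dy
--             # проверяем выход за пограничные линии
--             # TODO: ПРОВЕРКА ПОКА ОТКЛЮЧЕНА В СВЯЗИ С ТЕМ, ЧТО ЭТИ ЛИНИИ ПОМЕНЯЛИ ТИП!!!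
--             #if lower_border_line and y <= lower_border_line[x] or upper_border_line and y >= upper_border_line[x]:
--             #    continue  # пропускаем такую точку
--             if y in extremal_points[x]:
--                 # найдена точка данной линии в координатах (x, y)
--                 line.append(Point(x, y))
--                 old_x, old_y = x, y
--                 break
--     return line
-- ===== SOURCE B (Python) =====
-- import collections
--
-- max_line_interruption_distance = 25
--
-- Point = collections.namedtuple('Point', ['x', 'y'])
--
-- def trace_line(start_point, extremal_points, lower_border_line=None, upper_border_line=None):
--     """Trace the line right-to-left: in each column pick the extremal point
--     nearest to the previous y (within +-25, ties toward the smaller y)."""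
--     line = []
--     old_x, old_y = start_point
--     for x in range(old_x - 1, -1, -1):
--         best = None
--         for y in extremal_points[x]:
--             d = abs(y - old_y)
--             if d <= max_line_interruption_distance and (
--                     best is None or d < abs(best - old_y)
--                     or (d == abs(best - old_y) and y < best)):
--                 best = y
--         if best is not None:
--             line.append(Point(x, best))
--             old_y = best
--     return line
-- ===== Notes on version B (the rewrite author's own statement) =====
-- stated objective: simpler
-- what changed: Replaces the fixed ordered probe of 51 integer offsets (0,-1,+1,...,-25,+25) with membership tests by a single scan over the column's actual points that keeps the nearest-to-old_y point (ties toward the smaller y).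
import Mathlib
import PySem

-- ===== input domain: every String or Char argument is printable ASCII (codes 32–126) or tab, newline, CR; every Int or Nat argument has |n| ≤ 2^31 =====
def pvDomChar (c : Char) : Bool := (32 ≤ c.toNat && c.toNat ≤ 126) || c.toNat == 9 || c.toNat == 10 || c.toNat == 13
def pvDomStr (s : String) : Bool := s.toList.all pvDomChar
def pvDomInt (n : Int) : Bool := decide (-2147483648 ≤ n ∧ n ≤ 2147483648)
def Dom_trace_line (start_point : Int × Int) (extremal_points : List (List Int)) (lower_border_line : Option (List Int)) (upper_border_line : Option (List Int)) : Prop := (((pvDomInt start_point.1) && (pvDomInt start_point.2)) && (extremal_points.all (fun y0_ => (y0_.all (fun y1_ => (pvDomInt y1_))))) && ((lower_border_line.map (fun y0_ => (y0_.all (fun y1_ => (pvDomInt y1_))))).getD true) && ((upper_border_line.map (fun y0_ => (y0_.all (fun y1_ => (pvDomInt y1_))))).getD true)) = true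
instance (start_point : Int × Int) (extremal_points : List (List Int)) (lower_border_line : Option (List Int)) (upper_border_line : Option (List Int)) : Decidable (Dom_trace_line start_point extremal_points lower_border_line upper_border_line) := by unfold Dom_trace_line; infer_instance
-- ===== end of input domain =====

-- B replaces A's ordered probe of the 51 offsets 0,-1,+1,…,-25,+25 by one scan over the
-- column's points keeping the nearest one (ties toward the smaller y); objective: simpler.

-- ===== PORT A =====
-- dy for probe index i: (1-2*(i%2))*(i+1)//2
def pvDy (i : Int) : Int := PySem.Int.floordiv ((1 - 2 * PySem.Int.mod i 2) * (i + 1)) 2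

-- the inner 'for dy in …: if y in extremal_points[x]: …; break' loop of A
def pvProbe (row : List Int) (old_y : Int) : List Int → Option Int
  | [] => none
  | i :: rest =>
      let y := old_y + pvDy i
      if y ∈ row then some y else pvProbe row old_y rest

def trace_line (start_point : Int × Int) (extremal_points : List (List Int)) (lower_border_line : Option (List Int)) (upper_border_line : Option (List Int)) : List (Int × Int) :=
  ((PySem.List.pyRange (start_point.1 - 1) (-1) (-1)).foldl
    (fun (st : List (Int × Int) × Int × Int) x =>
      match PySem.List.pyGet? extremal_points x with
      | none => st   -- IndexError in Python; excluded by Pre_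
      | some row =>
        match pvProbe row st.2.2 (PySem.List.pyRange 0 (25 * 2 + 1) 1) with
        | none => st
        | some y => (st.1 ++ [(x, y)], x, y))
    ([], start_point.1, start_point.2)).1

-- ===== PORT B =====
-- one step of B's scan: keep y if it is in range and beats the current best
-- ('d <= 25 and (best is None or (d, y) < (abs(best-old_y), best))', short-circuit as a case split)
def pvStep (old_y : Int) (best : Option Int) (y : Int) : Option Int :=
  match best with
  | none => if |y - old_y| ≤ 25 then some y else none
  | some b =>
      if |y - old_y| ≤ 25 ∧
          (|y - old_y| < |b - old_y| ∨ (|y - old_y| = |b - old_y| ∧ y < b)) then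
        some y
      else some b

-- single scan over the column's points keeping the best candidate
def pvBest (old_y : Int) (row : List Int) : Option Int :=
  row.foldl (pvStep old_y) none

def trace_line_alt (start_point : Int × Int) (extremal_points : List (List Int)) (lower_border_line : Option (List Int)) (upper_border_line : Option (List Int)) : List (Int × Int) :=
  ((PySem.List.pyRange (start_point.1 - 1) (-1) (-1)).foldl
    (fun (st : List (Int × Int) × Int) x =>
      match PySem.List.pyGet? extremal_points x with
      | none => st   -- IndexError in Python; excluded by Pre_
      | some row =>
        match pvBest st.2 row with
        | none => st
        | some y => (st.1 ++ [(x, y)], y))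
    ([], start_point.2)).1

-- ===== PRECONDITION & SPEC =====
-- Pre_ excludes exactly the inputs where Python A raises IndexError: a start x whose
-- leftward columns are not all inside extremal_points.
def Pre_trace_line (start_point : Int × Int) (extremal_points : List (List Int)) (lower_border_line : Option (List Int)) (upper_border_line : Option (List Int)) : Prop :=
  start_point.1 ≤ 0 ∨ start_point.1 ≤ (extremal_points.length : Int)
instance (start_point : Int × Int) (extremal_points : List (List Int)) (lower_border_line : Option (List Int)) (upper_border_line : Option (List Int)) : Decidable (Pre_trace_line start_point extremal_points lower_border_line upper_border_line) := by unfold Pre_trace_line; infer_instance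
def pvWitness_trace_line : (Int × Int) × List (List Int) × Option (List Int) × Option (List Int) := ((2, 5), [[4, 6], [30]], none, none)

def Spec_trace_line (start_point : Int × Int) (extremal_points : List (List Int)) (lower_border_line : Option (List Int)) (upper_border_line : Option (List Int)) (out : List (Int × Int)) : Prop := out = trace_line_alt start_point extremal_points lower_border_line upper_border_line
instance (start_point : Int × Int) (extremal_points : List (List Int)) (lower_border_line : Option (List Int)) (upper_border_line : Option (List Int)) (out : List (Int × Int)) : Decidable (Spec_trace_line start_point extremal_points lower_border_line upper_border_line out) := by unfold Spec_trace_line; infer_instance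

-- ===== CLAIM (what is proved, stated in full; the proofs are below) =====
def Claim_equal_trace_line : Prop := ∀ (start_point : Int × Int) (extremal_points : List (List Int)) (lower_border_line : Option (List Int)) (upper_border_line : Option (List Int)), Dom_trace_line start_point extremal_points lower_border_line upper_border_line → Pre_trace_line start_point extremal_points lower_border_line upper_border_line → Spec_trace_line start_point extremal_points lower_border_line upper_border_line (trace_line start_point extremal_points lower_border_line upper_border_line)

-- ===== LEMMAS AND PROOFS =====

-- the "probe rank" of an offset d: the index at which the probe sequence visits d
def pvRank (d : Int) : Int := 2 * |d| - (if d < 0 then 1 else 0)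

lemma pvRank_nonneg (d : Int) : 0 ≤ pvRank d := by
  unfold pvRank; rcases abs_cases d with ⟨h1, h2⟩ | ⟨h1, h2⟩ <;> simp [h1] <;> omega

lemma pvRank_pvDy (i : Int) (h : 0 ≤ i) : pvRank (pvDy i) = i := by
  unfold pvRank pvDy
  rw [PySem.Int.mod_eq_emod_of_pos (by norm_num), PySem.Int.floordiv_eq_ediv_of_pos (by norm_num)]
  rcases Int.even_or_odd i with ⟨j, hj⟩ | ⟨j, hj⟩ <;> subst hj
  · have h2 : (j + j) % 2 = 0 := by omega
    rw [h2]
    have he : (1 - 2 * 0) * (j + j + 1) = 2 * j + 1 := by ring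
    rw [he]
    have hd : (2 * j + 1) / 2 = j := by omega
    rw [hd]
    rcases abs_cases j with ⟨a1, _⟩ | ⟨a1, _⟩ <;> rw [a1] <;> split_ifs <;> omega
  · have h2 : (2 * j + 1) % 2 = 1 := by omega
    rw [h2]
    have he : (1 - 2 * 1) * (2 * j + 1 + 1) = -(2 * j + 2) := by ring
    rw [he]
    have hd : (-(2 * j + 2)) / 2 = -(j + 1) := by omega
    rw [hd]
    rcases abs_cases (-(j + 1)) with ⟨a1, _⟩ | ⟨a1, _⟩ <;> rw [a1] <;> split_ifs <;> omega

lemma pvDy_pvRank (d : Int) : pvDy (pvRank d) = d := by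
  unfold pvRank pvDy
  rw [PySem.Int.mod_eq_emod_of_pos (by norm_num), PySem.Int.floordiv_eq_ediv_of_pos (by norm_num)]
  rcases lt_or_ge d 0 with hd | hd
  · rw [abs_of_neg hd, if_pos hd]
    have h2 : (2 * -d - 1) % 2 = 1 := by omega
    rw [h2]
    have he : (1 - 2 * 1) * (2 * -d - 1 + 1) = 2 * d := by ring
    rw [he]; omega
  · rw [abs_of_nonneg hd, if_neg (by omega)]
    have h2 : (2 * d - 0) % 2 = 0 := by omega
    rw [h2]
    have he : (1 - 2 * 0) * (2 * d - 0 + 1) = 2 * d + 1 := by ring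
    rw [he]; omega

lemma pvRank_lt_iff (oy y b : Int) :
    (|y - oy| < |b - oy| ∨ (|y - oy| = |b - oy| ∧ y < b)) ↔ pvRank (y - oy) < pvRank (b - oy) := by
  unfold pvRank
  rcases abs_cases (y - oy) with ⟨h1, h2⟩ | ⟨h1, h2⟩ <;>
    rcases abs_cases (b - oy) with ⟨h3, h4⟩ | ⟨h3, h4⟩ <;> simp [h1, h3] <;> omega

-- invariant of B's fold, generalized over the accumulator
lemma pvFold_spec (oy : Int) : ∀ (row : List Int) (acc : Option Int),
    (∀ c, acc = some c → |c - oy| ≤ 25) →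
    ((row.foldl (pvStep oy) acc = none → acc = none ∧ ∀ z ∈ row, ¬ |z - oy| ≤ 25) ∧
     (∀ b, row.foldl (pvStep oy) acc = some b →
        |b - oy| ≤ 25 ∧ (b ∈ row ∨ acc = some b) ∧
        (∀ z ∈ row, |z - oy| ≤ 25 → pvRank (b - oy) ≤ pvRank (z - oy)) ∧
        (∀ c, acc = some c → pvRank (b - oy) ≤ pvRank (c - oy)))) := by
  intro row
  induction row with
  | nil =>
      intro acc hacc
      simp only [List.foldl_nil]
      refine ⟨fun h => ⟨h, by simp⟩, fun b hb => ⟨hacc b hb, Or.inr hb, by simp, ?_⟩⟩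
      intro c hc; rw [hb] at hc; injection hc with h; rw [h]
  | cons y t ih =>
      intro acc hacc
      simp only [List.foldl_cons]
      have hacc' : ∀ c, pvStep oy acc y = some c → |c - oy| ≤ 25 := by
        intro c hc
        cases acc with
        | none =>
            simp only [pvStep] at hc
            split_ifs at hc with h1
            · injection hc with h; rw [← h]; exact h1
        | some a =>
            simp only [pvStep] at hc
            split_ifs at hc with h1
            · injection hc with h; rw [← h]; exact h1.1
            · injection hc with h; rw [← h]; exact hacc a rfl
      obtain ⟨ihn, ihs⟩ := ih (pvStep oy acc y) hacc'
      constructor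
      · intro h
        obtain ⟨h1, h2⟩ := ihn h
        cases acc with
        | none =>
            simp only [pvStep] at h1
            split_ifs at h1 with hy
            · refine ⟨rfl, ?_⟩
              intro z hz
              rcases List.mem_cons.mp hz with hz | hz
              · rw [hz]; exact hy
              · exact h2 z hz
        | some a => simp only [pvStep] at h1; split_ifs at h1
      · intro b hb
        obtain ⟨hle, hmem, hmin, haccle⟩ := ihs b hb
        refine ⟨hle, ?_, ?_, ?_⟩
        · rcases hmem with hm | hm
          · exact Or.inl (List.mem_cons_of_mem _ hm)
          · cases acc with
            | none =>
                simp only [pvStep] at hm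
                split_ifs at hm with h1
                · injection hm with h; rw [← h]; exact Or.inl List.mem_cons_self
            | some a =>
                simp only [pvStep] at hm
                split_ifs at hm with h1
                · injection hm with h; rw [← h]; exact Or.inl List.mem_cons_self
                · injection hm with h; rw [← h]; exact Or.inr rfl
        · intro z hz hz25
          rcases List.mem_cons.mp hz with hz | hz
          · rw [hz]
            cases acc with
            | none =>
                have hstep : pvStep oy none y = some y := by
                  simp only [pvStep]; rw [if_pos (hz ▸ hz25)]
                exact hz ▸ haccle y hstep
            | some a =>
                have hy25 : |y - oy| ≤ 25 := hz ▸ hz25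
                by_cases hlt : |y - oy| < |a - oy| ∨ (|y - oy| = |a - oy| ∧ y < a)
                · have hstep : pvStep oy (some a) y = some y := by
                    simp only [pvStep]; rw [if_pos ⟨hy25, hlt⟩]
                  exact haccle y hstep
                · have hstep : pvStep oy (some a) y = some a := by
                    simp only [pvStep]; rw [if_neg (by tauto)]
                  have h1 := haccle a hstep
                  have h2 : ¬ pvRank (y - oy) < pvRank (a - oy) := by
                    rw [← pvRank_lt_iff oy y a]; exact hlt
                  omega
          · exact hmin z hz hz25
        · intro c hc
          rw [hc] at haccle
          by_cases hy25 : |y - oy| ≤ 25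
          · by_cases hlt : |y - oy| < |c - oy| ∨ (|y - oy| = |c - oy| ∧ y < c)
            · have hstep : pvStep oy (some c) y = some y := by
                simp only [pvStep]; rw [if_pos ⟨hy25, hlt⟩]
              have h1 := haccle y hstep
              have h2 := (pvRank_lt_iff oy y c).mp hlt
              omega
            · have hstep : pvStep oy (some c) y = some c := by
                simp only [pvStep]; rw [if_neg (by tauto)]
              exact haccle c hstep
          · have hstep : pvStep oy (some c) y = some c := by
              simp only [pvStep]; rw [if_neg (by tauto)]
            exact haccle c hstep

-- characterization of pvBest
lemma pvBest_spec (oy : Int) (row : List Int) :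
    (pvBest oy row = none → ∀ z ∈ row, ¬ (|z - oy| ≤ 25)) ∧
    (∀ b, pvBest oy row = some b → b ∈ row ∧ |b - oy| ≤ 25 ∧
      ∀ z ∈ row, |z - oy| ≤ 25 → pvRank (b - oy) ≤ pvRank (z - oy)) := by
  obtain ⟨hn, hs⟩ := pvFold_spec oy row none (by intro c hc; cases hc)
  refine ⟨fun h => (hn h).2, fun b hb => ?_⟩
  obtain ⟨h1, h2, h3, _⟩ := hs b hb
  rcases h2 with h2 | h2
  · exact ⟨h2, h1, h3⟩
  · cases h2

-- pvProbe as find? over the probe indices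
lemma pvProbe_eq_find (row : List Int) (oy : Int) (l : List Int) :
    pvProbe row oy l = (l.find? (fun i => decide ((oy + pvDy i) ∈ row))).map (fun i => oy + pvDy i) := by
  induction l with
  | nil => rfl
  | cons i rest ih =>
      by_cases h : (oy + pvDy i) ∈ row <;> simp [pvProbe, List.find?, h, ih]

-- find? over an ascending integer range: first element satisfying p
lemma find_pyRange_aux (p : Int → Bool) : ∀ (n : Nat) (a b : Int), (b - a).toNat = n →
    ((∀ i, ((PySem.List.pyRange a b 1).find? p = some i) ↔
      (a ≤ i ∧ i < b ∧ p i ∧ ∀ j, a ≤ j → j < i → ¬ p j)) ∧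
    (((PySem.List.pyRange a b 1).find? p = none) ↔ ∀ i, a ≤ i → i < b → ¬ p i)) := by
  intro n
  induction n with
  | zero =>
      intro a b h
      have hba : b ≤ a := by omega
      rw [PySem.List.pyRange_one_eq_nil hba]
      constructor
      · intro i
        simp only [List.find?_nil]
        constructor
        · intro hh; cases hh
        · rintro ⟨h1, h2, -, -⟩; exact ((by omega : False)).elim
      · simp only [List.find?_nil]
        constructor
        · intro _ i h1 h2; exact ((by omega : False)).elim
        · intro _; trivial
  | succ n ihn =>
      intro a b h
      have hab : a < b := by omega
      rw [PySem.List.pyRange_one_cons hab]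
      obtain ⟨ihs, ihn'⟩ := ihn (a + 1) b (by omega)
      by_cases hpa : p a
      · have hf : (a :: PySem.List.pyRange (a + 1) b 1).find? p = some a := by
          simp [List.find?, hpa]
        rw [hf]
        constructor
        · intro i
          constructor
          · intro he
            injection he with he
            subst he
            exact ⟨le_refl a, hab, hpa, fun j hj1 hj2 => ((by omega : False)).elim⟩
          · rintro ⟨h1, h2, h3, h4⟩
            have hia : i = a := by
              by_contra hne
              exact h4 a (le_refl a) (by omega) hpa
            rw [hia]
        · constructor
          · intro he; cases he
          · intro hall; exact (hall a (le_refl a) hab hpa).elim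
      · have hf : (a :: PySem.List.pyRange (a + 1) b 1).find? p =
            (PySem.List.pyRange (a + 1) b 1).find? p := by
          simp [List.find?, hpa]
        rw [hf]
        constructor
        · intro i
          rw [ihs i]
          constructor
          · rintro ⟨h1, h2, h3, h4⟩
            refine ⟨by omega, h2, h3, ?_⟩
            intro j hj1 hj2
            by_cases hja : j = a
            · rw [hja]; exact hpa
            · exact h4 j (by omega) hj2
          · rintro ⟨h1, h2, h3, h4⟩
            have hia : i ≠ a := fun he => hpa (he ▸ h3)
            refine ⟨by omega, h2, h3, ?_⟩
            intro j hj1 hj2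
            exact h4 j (by omega) hj2
        · rw [ihn']
          constructor
          · intro hall i h1 h2
            by_cases hia : i = a
            · rw [hia]; exact hpa
            · exact hall i (by omega) h2
          · intro hall i h1 h2
            exact hall i (by omega) h2

lemma find_pyRange (p : Int → Bool) (a b : Int) :
    (∀ i, ((PySem.List.pyRange a b 1).find? p = some i) ↔
      (a ≤ i ∧ i < b ∧ p i ∧ ∀ j, a ≤ j → j < i → ¬ p j)) ∧
    (((PySem.List.pyRange a b 1).find? p = none) ↔ ∀ i, a ≤ i → i < b → ¬ p i) :=
  find_pyRange_aux p (b - a).toNat a b rfl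

-- |pvDy i| ≤ 25 for probe indices
lemma abs_pvDy_le (i : Int) (h0 : 0 ≤ i) (h : i ≤ 50) : |pvDy i| ≤ 25 := by
  have hr := pvRank_pvDy i h0
  unfold pvRank at hr
  rcases abs_cases (pvDy i) with ⟨a1, a2⟩ | ⟨a1, a2⟩ <;> rw [a1] at hr <;>
    split_ifs at hr <;> omega

-- the inner loops agree
lemma inner_eq (row : List Int) (oy : Int) :
    pvProbe row oy (PySem.List.pyRange 0 (25 * 2 + 1) 1) = pvBest oy row := by
  rw [pvProbe_eq_find]
  obtain ⟨hsome, hnone⟩ := find_pyRange (fun i => decide ((oy + pvDy i) ∈ row)) 0 (25 * 2 + 1)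
  cases hb : pvBest oy row with
  | none =>
      have hno := (pvBest_spec oy row).1 hb
      have hfn : ((PySem.List.pyRange 0 (25 * 2 + 1) 1).find?
          (fun i => decide ((oy + pvDy i) ∈ row))) = none := by
        rw [hnone]
        intro i h1 h2 hc
        have hmem : (oy + pvDy i) ∈ row := of_decide_eq_true hc
        have h25 : |oy + pvDy i - oy| ≤ 25 := by
          have : oy + pvDy i - oy = pvDy i := by ring
          rw [this]
          exact abs_pvDy_le i h1 (by omega)
        exact hno _ hmem h25
      rw [hfn]; rfl
  | some b =>
      obtain ⟨hmem, hle, hmin⟩ := (pvBest_spec oy row).2 b hb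
      have h0 : 0 ≤ pvRank (b - oy) := pvRank_nonneg _
      have hdy : pvDy (pvRank (b - oy)) = b - oy := pvDy_pvRank (b - oy)
      have hlt : pvRank (b - oy) < 25 * 2 + 1 := by
        have hb25 := abs_le.mp hle
        unfold pvRank
        rcases abs_cases (b - oy) with ⟨a1, -⟩ | ⟨a1, -⟩ <;> rw [a1] <;> split_ifs <;> omega
      have hfs : ((PySem.List.pyRange 0 (25 * 2 + 1) 1).find?
          (fun i => decide ((oy + pvDy i) ∈ row))) = some (pvRank (b - oy)) := by
        rw [hsome]
        refine ⟨h0, hlt, ?_, ?_⟩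
        · have : oy + pvDy (pvRank (b - oy)) = b := by rw [hdy]; ring
          rw [this]; exact decide_eq_true hmem
        · intro j hj1 hj2 hc
          have hmemj : (oy + pvDy j) ∈ row := of_decide_eq_true hc
          have h25 : |oy + pvDy j - oy| ≤ 25 := by
            have he : oy + pvDy j - oy = pvDy j := by ring
            rw [he]
            exact abs_pvDy_le j hj1 (by omega)
          have := hmin _ hmemj h25
          have he : oy + pvDy j - oy = pvDy j := by ring
          rw [he] at this
          rw [pvRank_pvDy j hj1] at this
          omega
      rw [hfs]
      simp only [Option.map_some]
      rw [hdy]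
      congr 1
      ring

theorem trace_line_spec : Claim_equal_trace_line := by
  intro sp eps lb ub _ _
  unfold Spec_trace_line trace_line trace_line_alt
  generalize PySem.List.pyRange (sp.1 - 1) (-1) (-1) = l
  suffices h : ∀ (l : List Int) (line : List (Int × Int)) (ox oy : Int),
      ((l.foldl (fun (st : List (Int × Int) × Int × Int) x =>
        match PySem.List.pyGet? eps x with
        | none => st
        | some row =>
          match pvProbe row st.2.2 (PySem.List.pyRange 0 (25 * 2 + 1) 1) with
          | none => st
          | some y => (st.1 ++ [(x, y)], x, y)) (line, ox, oy)).1) =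
      ((l.foldl (fun (st : List (Int × Int) × Int) x =>
        match PySem.List.pyGet? eps x with
        | none => st
        | some row =>
          match pvBest st.2 row with
          | none => st
          | some y => (st.1 ++ [(x, y)], y)) (line, oy)).1) by
    exact h l [] sp.1 sp.2
  intro l
  induction l with
  | nil => intro line ox oy; rfl
  | cons x rest ih =>
      intro line ox oy
      simp only [List.foldl_cons]
      cases hg : PySem.List.pyGet? eps x with
      | none => exact ih line ox oy
      | some row =>
          dsimp only
          rw [inner_eq row oy]
          cases hb : pvBest oy row with
          | none => exact ih line ox oy
          | some y => exact ih (line ++ [(x, y)]) x y
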